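-- pv_equiv track=rewrite | github.com/Rupthuz/Battleship-PT3-main | run.py | check_boat
-- ===== SOURCE A (Python) =====
-- def check_ok(boat, taken):
--     boat.sort()
--     for i in range(len(boat)):
--         num = boat[i]
--         if num in taken:
--             boat = [-1]
--             break
--         elif num < 0 or num > 99:
--             boat = [-1]
--             break
--         elif num % 10 == 9 and i < len(boat) - 1:
--             if boat[i + 1] % 10 == 0:
--                 boat = [-1]
--                 break
--         if i != 0:
--             if boat[i] != boat[i - 1] + 1 and boat[i] != boat[i - 1] + 10:
--                 boat = [-1]
--                 break
--
--     return boat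
--
-- def check_boat(length, start, direction, taken):
--     boat = []
--     if direction == 1:
--         for i in range(length):
--             boat.append(start - i * 10)
--     elif direction == 2:
--         for i in range(length):
--             boat.append(start + i)
--     elif direction == 3:
--         for i in range(length):
--             boat.append(start + i * 10)
--     elif direction == 4:
--         for i in range(length):
--             boat.append(start - i)
--     boat = check_ok(boat, taken)
--     return boat
-- ===== SOURCE B (Python) =====
-- def check_boat(length, start, direction, taken):
--     # Closed-form: the boat is an arithmetic progression, so instead of sorting and
--     # scanning neighbours we compute its endpoints and validate by interval arithmetic.
--     if direction not in (1, 2, 3, 4) or length <= 0: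
--         return []
--     step = 1 if direction in (2, 4) else 10
--     span = (length - 1) * step
--     lo = start - span if direction in (1, 4) else start
--     hi = lo + span
--     if lo < 0 or hi > 99 or (step == 1 and lo // 10 != hi // 10) or not set(range(lo, hi + 1, step)).isdisjoint(taken):
--         return [-1]
--     return list(range(lo, hi + 1, step))
-- ===== Notes on version B (the rewrite author's own statement) =====
-- stated objective: alternative
-- what changed: A builds the cell list, sorts it and validates neighbour pairs in one break-on-failure loop; B never sorts or scans pairs: it computes the progression's endpoints (lo, hi) in closed form from direction/start/length and validates by interval arithmetic (lo >= 0, hi <= 99, same row lo//10 == hi//10 for horizontal boats) plus one set-disjointness test against taken, emitting the range directly.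
import Mathlib
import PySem

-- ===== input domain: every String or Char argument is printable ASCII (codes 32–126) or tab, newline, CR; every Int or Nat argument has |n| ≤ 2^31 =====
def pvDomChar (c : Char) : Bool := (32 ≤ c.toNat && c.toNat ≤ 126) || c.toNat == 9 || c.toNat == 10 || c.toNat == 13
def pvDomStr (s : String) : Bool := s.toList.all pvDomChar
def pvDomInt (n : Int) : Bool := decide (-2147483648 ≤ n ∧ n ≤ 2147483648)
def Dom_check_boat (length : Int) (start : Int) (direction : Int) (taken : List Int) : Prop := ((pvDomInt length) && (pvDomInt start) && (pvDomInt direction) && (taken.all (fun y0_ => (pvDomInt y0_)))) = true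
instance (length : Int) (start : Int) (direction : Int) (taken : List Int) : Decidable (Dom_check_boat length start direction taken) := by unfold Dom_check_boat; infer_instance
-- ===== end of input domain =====

-- B replaces A's sort-then-neighbour-scan validation by closed-form interval arithmetic:
-- the boat is an arithmetic progression, so B computes its endpoints lo/hi directly and
-- validates by lo ≥ 0, hi ≤ 99, same-row (lo//10 = hi//10) for horizontal boats, and one
-- disjointness test against taken ('alternative' objective, no speed claim).

-- ===== PORT A =====
-- the break-loop of check_ok: i walks the (sorted) boat, any failing check yields [-1]
def pvCheckOkLoop (b t : List Int) (i : Nat) : List Int :=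
  if i < b.length then
    if t.contains (b.getD i 0) then [-1]
    else if b.getD i 0 < 0 || b.getD i 0 > 99 then [-1]
    else if PySem.Int.mod (b.getD i 0) 10 == 9 && decide (i < b.length - 1) &&
            PySem.Int.mod (b.getD (i+1) 0) 10 == 0 then [-1]
    else if decide (i ≠ 0) && !(b.getD i 0 == b.getD (i-1) 0 + 1) &&
            !(b.getD i 0 == b.getD (i-1) 0 + 10) then [-1]
    else pvCheckOkLoop b t (i+1)
  else b
termination_by b.length - i

def pvCheckOk (boat taken : List Int) : List Int :=
  pvCheckOkLoop (PySem.List.sorted boat (fun x => x) false) taken 0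

def check_boat (length : Int) (start : Int) (direction : Int) (taken : List Int) : List Int :=
  let boat : List Int :=
    if direction == 1 then (PySem.List.pyRange 0 length 1).foldl (fun a i => a ++ [start - i * 10]) []
    else if direction == 2 then (PySem.List.pyRange 0 length 1).foldl (fun a i => a ++ [start + i]) []
    else if direction == 3 then (PySem.List.pyRange 0 length 1).foldl (fun a i => a ++ [start + i * 10]) []
    else if direction == 4 then (PySem.List.pyRange 0 length 1).foldl (fun a i => a ++ [start - i]) []
    else []
  pvCheckOk boat taken

-- ===== PORT B =====
-- 'set(range(lo, hi+1, step)).isdisjoint(taken)' is ported as a membership scan of taken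
-- over the cell list (the cells are distinct, so the set holds exactly these elements).
def check_boat_alt (length : Int) (start : Int) (direction : Int) (taken : List Int) : List Int :=
  if !(direction == 1 || direction == 2 || direction == 3 || direction == 4) || decide (length ≤ 0) then []
  else
    let step : Int := if direction == 2 || direction == 4 then 1 else 10
    let span : Int := (length - 1) * step
    let lo : Int := if direction == 1 || direction == 4 then start - span else start
    let hi : Int := lo + span
    let cells : List Int := PySem.List.pyRange lo (hi + 1) step
    if decide (lo < 0) || decide (hi > 99) ||
       (step == 1 && !(PySem.Int.floordiv lo 10 == PySem.Int.floordiv hi 10)) ||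
       taken.any (fun t => cells.contains t) then [-1]
    else cells

-- ===== PRECONDITION & SPEC =====
def Spec_check_boat (length : Int) (start : Int) (direction : Int) (taken : List Int) (out : List Int) : Prop := out = check_boat_alt length start direction taken
instance (length : Int) (start : Int) (direction : Int) (taken : List Int) (out : List Int) : Decidable (Spec_check_boat length start direction taken out) := by unfold Spec_check_boat; infer_instance

-- ===== CLAIM (what is proved, stated in full; the proofs are below) =====
def Claim_equal_check_boat : Prop := ∀ (length : Int) (start : Int) (direction : Int) (taken : List Int), Dom_check_boat length start direction taken → Spec_check_boat length start direction taken (check_boat length start direction taken)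

-- ===== LEMMAS AND PROOFS =====

-- the ascending arithmetic progression lo, lo+s, …, lo+s*(n-1)
def ascM (lo s : Int) (n : Nat) : List Int := (List.range n).map (fun k : Nat => lo + s * (k : Int))

-- the combined per-index failure condition of A's loop
def pvCond (b t : List Int) (i : Nat) : Bool :=
  t.contains (b.getD i 0) ||
  (decide (b.getD i 0 < 0) || decide (b.getD i 0 > 99)) ||
  (PySem.Int.mod (b.getD i 0) 10 == 9 && decide (i < b.length - 1) &&
     PySem.Int.mod (b.getD (i+1) 0) 10 == 0) ||
  (decide (i ≠ 0) && !(b.getD i 0 == b.getD (i-1) 0 + 1) && !(b.getD i 0 == b.getD (i-1) 0 + 10))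

theorem pvCheckOkLoop_eq (b t : List Int) (i : Nat) :
    pvCheckOkLoop b t i = if (List.range' i (b.length - i)).any (pvCond b t) then [-1] else b := by
  rw [pvCheckOkLoop]
  by_cases h : i < b.length
  · have hlen : b.length - i = (b.length - (i+1)) + 1 := by omega
    rw [if_pos h, hlen, List.range'_succ, List.any_cons, pvCheckOkLoop_eq b t (i+1)]
    generalize (List.range' (i+1) (b.length - (i+1))).any (pvCond b t) = r
    unfold pvCond
    generalize t.contains (b.getD i 0) = c1
    generalize (decide (b.getD i 0 < 0) || decide (b.getD i 0 > 99)) = c2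
    generalize (PySem.Int.mod (b.getD i 0) 10 == 9 && decide (i < b.length - 1) &&
      PySem.Int.mod (b.getD (i+1) 0) 10 == 0) = c3
    generalize (decide (i ≠ 0) && !(b.getD i 0 == b.getD (i-1) 0 + 1) &&
      !(b.getD i 0 == b.getD (i-1) 0 + 10)) = c4
    cases c1 <;> cases c2 <;> cases c3 <;> cases c4 <;> cases r <;> simp
  · have hlen : b.length - i = 0 := by omega
    rw [if_neg h, hlen]
    simp
termination_by b.length - i

theorem length_ascM (lo s : Int) (n : Nat) : (ascM lo s n).length = n := by
  simp [ascM]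

theorem mem_ascM (lo s : Int) (n : Nat) (x : Int) :
    x ∈ ascM lo s n ↔ ∃ k : Nat, k < n ∧ x = lo + s * k := by
  simp [ascM, eq_comm]

theorem pairwise_ascM (lo s : Int) (n : Nat) (hs : 0 < s) :
    (ascM lo s n).Pairwise (· < ·) := by
  rw [ascM, List.pairwise_map]
  refine List.pairwise_lt_range.imp ?_
  intro a b h
  have hab : (a : Int) < b := by exact_mod_cast h
  nlinarith

theorem sorted_ascM (lo s : Int) (n : Nat) (hs : 0 < s) :
    PySem.List.sorted (ascM lo s n) (fun x => x) false = ascM lo s n :=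
  PySem.List.sorted_eq_of_perm_of_pairwise_lt _ _ _ (List.Perm.refl _)
    (pairwise_ascM lo s n hs)

-- the descending progression hi, hi-s, … is the reverse of ascM (hi - s*(n-1)) s n
theorem desc_eq_reverse_ascM (hi s : Int) (n : Nat) :
    (List.range n).map (fun k : Nat => hi - s * (k : Int)) = (ascM (hi - s * ((n:Int) - 1)) s n).reverse := by
  apply List.ext_getElem
  · simp [ascM]
  · intro k h1 h2
    have hk : k < n := by simpa using h1
    rw [List.getElem_reverse]
    simp only [ascM, List.getElem_map, List.getElem_range, List.length_map, List.length_range]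
    have hcast : ((n - 1 - k : Nat) : Int) = (n : Int) - 1 - k := by omega
    rw [hcast]
    ring

theorem sorted_desc (hi s : Int) (n : Nat) (hs : 0 < s) :
    PySem.List.sorted ((List.range n).map (fun k : Nat => hi - s * (k : Int))) (fun x => x) false
      = ascM (hi - s * ((n:Int) - 1)) s n := by
  apply PySem.List.sorted_eq_of_perm_of_pairwise_lt
  · rw [desc_eq_reverse_ascM]
    exact (List.reverse_perm _).symm
  · exact pairwise_ascM _ s n hs

theorem pyRange_asc (lo s hi : Int) (n : Nat) (hn : 1 ≤ n) (hs : 0 < s)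
    (hhi : hi = lo + s * ((n:Int) - 1)) :
    PySem.List.pyRange lo (hi + 1) s = ascM lo s n := by
  rw [PySem.List.pyRange_of_pos _ _ hs, ascM]
  have hlt : lo < hi + 1 := by nlinarith [Int.natCast_pos.mpr hn]
  rw [if_pos hlt]
  have harg : hi + 1 - lo + s - 1 = s * n := by rw [hhi]; ring
  rw [harg, Int.mul_ediv_cancel_left _ (by omega : s ≠ 0)]
  simp

theorem any_or_split {α : Type} (l : List α) (p q : α → Bool) :
    l.any (fun x => p x || q x) = (l.any p || l.any q) := by
  induction l with
  | nil => simp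
  | cons a l ih =>
    cases hp : p a <;> cases hq : q a <;> simp [List.any_cons, hp, hq, ih]

theorem getD_ascM (lo s : Int) (n : Nat) (i : Nat) (hi : i < n) :
    (ascM lo s n).getD i 0 = lo + s * i :=
  PySem.List.getD_map_range (fun k : Nat => lo + s * (k : Int)) n i 0 hi

-- the four validation passes over the progression, characterised one by one
theorem passT1 (lo s : Int) (n : Nat) (t : List Int) :
    (List.range n).any (fun i => t.contains ((ascM lo s n).getD i 0)) =
      t.any (fun x => (ascM lo s n).contains x) := by
  rw [Bool.eq_iff_iff]
  simp only [List.any_eq_true, List.mem_range, List.contains_iff_mem]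
  constructor
  · rintro ⟨i, hi, hm⟩
    refine ⟨(ascM lo s n).getD i 0, hm, ?_⟩
    rw [getD_ascM lo s n i hi, mem_ascM]
    exact ⟨i, hi, rfl⟩
  · rintro ⟨x, hx, hm⟩
    rw [mem_ascM] at hm
    obtain ⟨k, hk, rfl⟩ := hm
    exact ⟨k, hk, by rw [getD_ascM lo s n k hk]; exact hx⟩

theorem passT2 (lo s hi : Int) (n : Nat) (hn : 1 ≤ n) (hs : s = 1 ∨ s = 10)
    (hhi : hi = lo + s * ((n:Int) - 1)) :
    (List.range n).any (fun i =>
        decide ((ascM lo s n).getD i 0 < 0) || decide ((ascM lo s n).getD i 0 > 99)) =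
      (decide (lo < 0) || decide (hi > 99)) := by
  rw [Bool.eq_iff_iff]
  simp only [List.any_eq_true, List.mem_range, Bool.or_eq_true, decide_eq_true_eq]
  constructor
  · rintro ⟨i, hi', hc⟩
    rw [getD_ascM lo s n i hi'] at hc
    rcases hs with rfl | rfl <;> omega
  · rintro (h | h)
    · exact ⟨0, by omega, by rw [getD_ascM lo s n 0 (by omega)]; left; rcases hs with rfl | rfl <;> omega⟩
    · refine ⟨n - 1, by omega, ?_⟩
      rw [getD_ascM lo s n (n-1) (by omega)]
      right
      rcases hs with rfl | rfl <;> omega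

theorem passT3 (lo s hi : Int) (n : Nat) (hn : 1 ≤ n) (hs : s = 1 ∨ s = 10)
    (hhi : hi = lo + s * ((n:Int) - 1)) :
    (List.range n).any (fun i =>
        PySem.Int.mod ((ascM lo s n).getD i 0) 10 == 9 &&
        decide (i < (ascM lo s n).length - 1) &&
        PySem.Int.mod ((ascM lo s n).getD (i+1) 0) 10 == 0) =
      (s == 1 && !(PySem.Int.floordiv lo 10 == PySem.Int.floordiv hi 10)) := by
  rw [Bool.eq_iff_iff]
  simp only [List.any_eq_true, List.mem_range, Bool.and_eq_true, beq_iff_eq,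
    decide_eq_true_eq, Bool.not_eq_eq_eq_not, Bool.not_true, beq_eq_false_iff_ne, ne_eq,
    length_ascM]
  constructor
  · rintro ⟨i, hi', ⟨h9, hlt⟩, h0⟩
    rw [getD_ascM lo s n i hi'] at h9
    rw [getD_ascM lo s n (i+1) (by omega)] at h0
    rw [PySem.Int.mod_eq_emod_of_pos (by norm_num)] at h9 h0
    rcases hs with rfl | rfl
    · refine ⟨rfl, ?_⟩
      rw [PySem.Int.floordiv_eq_ediv_of_pos (by norm_num),
          PySem.Int.floordiv_eq_ediv_of_pos (by norm_num)]
      omega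
    · exfalso; omega
  · rintro ⟨hs1, hne⟩
    subst hs1
    rw [PySem.Int.floordiv_eq_ediv_of_pos (by norm_num),
        PySem.Int.floordiv_eq_ediv_of_pos (by norm_num)] at hne
    have hb1 : (9 - lo % 10).toNat < n - 1 := by omega
    refine ⟨(9 - lo % 10).toNat, by omega, ⟨?_, hb1⟩, ?_⟩
    · rw [getD_ascM lo 1 n ((9 - lo % 10).toNat) (by omega),
          PySem.Int.mod_eq_emod_of_pos (by norm_num)]
      omega
    · rw [getD_ascM lo 1 n ((9 - lo % 10).toNat + 1) (by omega),
          PySem.Int.mod_eq_emod_of_pos (by norm_num)]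
      omega

theorem passT4 (lo s : Int) (n : Nat) (hs : s = 1 ∨ s = 10) :
    (List.range n).any (fun i =>
        decide (i ≠ 0) && !((ascM lo s n).getD i 0 == (ascM lo s n).getD (i-1) 0 + 1) &&
        !((ascM lo s n).getD i 0 == (ascM lo s n).getD (i-1) 0 + 10)) = false := by
  rw [Bool.eq_iff_iff]
  simp only [List.any_eq_true, List.mem_range, Bool.and_eq_true, decide_eq_true_eq,
    Bool.not_eq_eq_eq_not, Bool.not_true, beq_eq_false_iff_ne, ne_eq, Bool.false_eq_true,
    iff_false, not_exists]
  intro i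
  rintro ⟨hi', ⟨hne, h1⟩, h10⟩
  rw [getD_ascM lo s n i hi', getD_ascM lo s n (i-1) (by omega)] at h1 h10
  rcases hs with rfl | rfl
  · exact h1 (by omega)
  · exact h10 (by omega)

-- A's validation loop over the sorted progression equals B's closed-form test
theorem loop_char (lo s hi : Int) (n : Nat) (t : List Int) (hn : 1 ≤ n)
    (hs : s = 1 ∨ s = 10) (hhi : hi = lo + s * ((n:Int) - 1)) :
    pvCheckOkLoop (ascM lo s n) t 0 =
      if decide (lo < 0) || decide (hi > 99) ||
         (s == 1 && !(PySem.Int.floordiv lo 10 == PySem.Int.floordiv hi 10)) ||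
         t.any (fun x => (ascM lo s n).contains x) then [-1]
      else ascM lo s n := by
  rw [pvCheckOkLoop_eq]
  have hrange : List.range' 0 ((ascM lo s n).length - 0) = List.range n := by
    rw [length_ascM, Nat.sub_zero, List.range_eq_range']
  rw [hrange]
  have hsplit : (List.range n).any (pvCond (ascM lo s n) t) =
      ((((List.range n).any (fun i => t.contains ((ascM lo s n).getD i 0)) ||
         (List.range n).any (fun i =>
           decide ((ascM lo s n).getD i 0 < 0) || decide ((ascM lo s n).getD i 0 > 99))) ||
        (List.range n).any (fun i =>
           PySem.Int.mod ((ascM lo s n).getD i 0) 10 == 9 &&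
           decide (i < (ascM lo s n).length - 1) &&
           PySem.Int.mod ((ascM lo s n).getD (i+1) 0) 10 == 0)) ||
       (List.range n).any (fun i =>
           decide (i ≠ 0) && !((ascM lo s n).getD i 0 == (ascM lo s n).getD (i-1) 0 + 1) &&
           !((ascM lo s n).getD i 0 == (ascM lo s n).getD (i-1) 0 + 10))) := by
    unfold pvCond
    rw [any_or_split, any_or_split, any_or_split]
  rw [hsplit, passT1 lo s n t, passT2 lo s hi n hn hs hhi, passT3 lo s hi n hn hs hhi,
      passT4 lo s n hs]
  generalize t.any (fun x => (ascM lo s n).contains x) = c1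
  generalize (decide (lo < 0) || decide (hi > 99)) = c2
  generalize (s == 1 && !(PySem.Int.floordiv lo 10 == PySem.Int.floordiv hi 10)) = c3
  cases c1 <;> cases c2 <;> cases c3 <;> simp

theorem loopEmpty (t : List Int) :
    pvCheckOkLoop (PySem.List.sorted ([] : List Int) (fun x => x) false) t 0 = [] := by
  rw [show PySem.List.sorted ([] : List Int) (fun x => x) false = [] from rfl, pvCheckOkLoop_eq]
  simp

-- ===== VERDICT (by name: the statement is the Claim_ definition above) =====
theorem check_boat_spec : Claim_equal_check_boat := by
  intro length start direction taken _
  unfold Spec_check_boat check_boat check_boat_alt pvCheckOk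
  by_cases h1 : direction = 1
  · subst h1
    by_cases hl : length ≤ 0
    · rw [PySem.List.pyRange_one_eq_nil hl]
      simp only [List.foldl_nil, decide_eq_true hl, Bool.or_true, Int.reduceBEq,
        Bool.false_eq_true, if_false, if_true, loopEmpty]
    · have hl' : ¬ length ≤ 0 := hl
      have hc : ((length.toNat : Int)) = length := Int.toNat_of_nonneg (by omega)
      have hn : 1 ≤ length.toNat := by omega
      simp only [Int.reduceBEq, Bool.or_false, 
        Bool.not_true, decide_eq_false hl', Bool.or_self,
        Bool.false_eq_true, if_false, if_true]
      rw [PySem.List.foldl_append_singleton_eq_map, List.nil_append, PySem.List.pyRange_one,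
        List.map_map]
      have hn0 : (length - 0).toNat = length.toNat := by omega
      rw [hn0]
      have hm : (List.range length.toNat).map ((fun i => start - i * 10) ∘ (fun k : Nat => (0:Int) + ↑k)) =
          (List.range length.toNat).map (fun k : Nat => start - 10 * (k : Int)) := by
        apply List.map_congr_left
        intro k _
        simp only [Function.comp_apply]
        ring
      rw [hm, sorted_desc start 10 length.toNat (by norm_num)]
      have hlo : start - 10 * ((length.toNat : Int) - 1) = start - (length - 1) * 10 := by omega
      rw [hlo]
      rw [loop_char (start - (length - 1) * 10) 10 (start - (length - 1) * 10 + (length - 1) * 10)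
            length.toNat taken hn (Or.inr rfl) (by omega)]
      rw [pyRange_asc (start - (length - 1) * 10) 10 (start - (length - 1) * 10 + (length - 1) * 10)
            length.toNat hn (by norm_num) (by omega)]
      simp only [Int.reduceBEq, Bool.false_and, Bool.or_false]
  by_cases h2 : direction = 2
  · subst h2
    by_cases hl : length ≤ 0
    · rw [PySem.List.pyRange_one_eq_nil hl]
      simp only [List.foldl_nil, decide_eq_true hl, Bool.or_true, Int.reduceBEq,
        Bool.false_eq_true, if_false, if_true, loopEmpty]
    · have hl' : ¬ length ≤ 0 := hl
      have hc : ((length.toNat : Int)) = length := Int.toNat_of_nonneg (by omega)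
      have hn : 1 ≤ length.toNat := by omega
      simp only [Int.reduceBEq, Bool.or_false, Bool.or_true,
        Bool.not_true, decide_eq_false hl', Bool.or_self,
        Bool.false_eq_true, if_false, if_true]
      rw [PySem.List.foldl_append_singleton_eq_map, List.nil_append, PySem.List.pyRange_one,
        List.map_map]
      have hn0 : (length - 0).toNat = length.toNat := by omega
      rw [hn0]
      have hm : (List.range length.toNat).map ((fun i => start + i) ∘ (fun k : Nat => (0:Int) + ↑k)) =
          ascM start 1 length.toNat := by
        rw [ascM]
        apply List.map_congr_left
        intro k _
        simp only [Function.comp_apply]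
        ring
      rw [hm, sorted_ascM start 1 length.toNat (by norm_num)]
      rw [loop_char start 1 (start + (length - 1) * 1) length.toNat taken hn (Or.inl rfl) (by omega)]
      rw [pyRange_asc start 1 (start + (length - 1) * 1) length.toNat hn (by norm_num) (by omega)]
      simp only [Int.reduceBEq, Bool.true_and]
  by_cases h3 : direction = 3
  · subst h3
    by_cases hl : length ≤ 0
    · rw [PySem.List.pyRange_one_eq_nil hl]
      simp only [List.foldl_nil, decide_eq_true hl, Bool.or_true, Int.reduceBEq,
        Bool.false_eq_true, if_false, if_true, loopEmpty]
    · have hl' : ¬ length ≤ 0 := hl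
      have hc : ((length.toNat : Int)) = length := Int.toNat_of_nonneg (by omega)
      have hn : 1 ≤ length.toNat := by omega
      simp only [Int.reduceBEq, Bool.or_false, Bool.or_true,
        Bool.not_true, decide_eq_false hl', Bool.or_self,
        Bool.false_eq_true, if_false, if_true]
      rw [PySem.List.foldl_append_singleton_eq_map, List.nil_append, PySem.List.pyRange_one,
        List.map_map]
      have hn0 : (length - 0).toNat = length.toNat := by omega
      rw [hn0]
      have hm : (List.range length.toNat).map ((fun i => start + i * 10) ∘ (fun k : Nat => (0:Int) + ↑k)) =
          ascM start 10 length.toNat := by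
        rw [ascM]
        apply List.map_congr_left
        intro k _
        simp only [Function.comp_apply]
        ring
      rw [hm, sorted_ascM start 10 length.toNat (by norm_num)]
      rw [loop_char start 10 (start + (length - 1) * 10) length.toNat taken hn (Or.inr rfl) (by omega)]
      rw [pyRange_asc start 10 (start + (length - 1) * 10) length.toNat hn (by norm_num) (by omega)]
      simp only [Int.reduceBEq, Bool.false_and, Bool.or_false]
  by_cases h4 : direction = 4
  · subst h4
    by_cases hl : length ≤ 0
    · rw [PySem.List.pyRange_one_eq_nil hl]
      simp only [List.foldl_nil, decide_eq_true hl, Bool.or_true, Int.reduceBEq,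
        Bool.false_eq_true, if_false, if_true, loopEmpty]
    · have hl' : ¬ length ≤ 0 := hl
      have hc : ((length.toNat : Int)) = length := Int.toNat_of_nonneg (by omega)
      have hn : 1 ≤ length.toNat := by omega
      simp only [Int.reduceBEq, Bool.or_true,
        Bool.not_true, decide_eq_false hl', Bool.or_self,
        Bool.false_eq_true, if_false, if_true]
      rw [PySem.List.foldl_append_singleton_eq_map, List.nil_append, PySem.List.pyRange_one,
        List.map_map]
      have hn0 : (length - 0).toNat = length.toNat := by omega
      rw [hn0]
      have hm : (List.range length.toNat).map ((fun i => start - i) ∘ (fun k : Nat => (0:Int) + ↑k)) =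
          (List.range length.toNat).map (fun k : Nat => start - 1 * (k : Int)) := by
        apply List.map_congr_left
        intro k _
        simp only [Function.comp_apply]
        ring
      rw [hm, sorted_desc start 1 length.toNat (by norm_num)]
      have hlo : start - 1 * ((length.toNat : Int) - 1) = start - (length - 1) * 1 := by omega
      rw [hlo]
      rw [loop_char (start - (length - 1) * 1) 1 (start - (length - 1) * 1 + (length - 1) * 1)
            length.toNat taken hn (Or.inl rfl) (by omega)]
      rw [pyRange_asc (start - (length - 1) * 1) 1 (start - (length - 1) * 1 + (length - 1) * 1)
            length.toNat hn (by norm_num) (by omega)]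
      simp only [Int.reduceBEq, Bool.true_and]
  · have f1 : (direction == (1:Int)) = false := beq_eq_false_iff_ne.mpr h1
    have f2 : (direction == (2:Int)) = false := beq_eq_false_iff_ne.mpr h2
    have f3 : (direction == (3:Int)) = false := beq_eq_false_iff_ne.mpr h3
    have f4 : (direction == (4:Int)) = false := beq_eq_false_iff_ne.mpr h4
    simp only [f1, f2, f3, f4, Bool.or_self, Bool.not_false,
      Bool.true_or, Bool.false_eq_true, if_false, if_true, loopEmpty]
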